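-- pv_equiv track=rewrite | github.com/kkuwaran/network-flow | main/flowtb_algorithm.py | group_indices
-- ===== SOURCE A (Python) =====
-- def group_indices(indices):
--     '''Group Indices within same path'''
--
--     index_groups = []
--     for idx, sub_idx in sorted(indices):
--         if len(index_groups) == 0 or index_groups[-1][0][0] != idx:
--             index_groups.append([(idx, sub_idx)])
--         else:
--             index_groups[-1].append((idx, sub_idx))
--     return index_groups
-- ===== SOURCE B (Python) =====
-- def group_indices(indices):
--     '''Group Indices within same path'''
--     keys = sorted({idx for idx, _ in indices})
--     return [sorted(p for p in indices if p[0] == k) for k in keys]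
-- ===== Notes on version B (the rewrite author's own statement) =====
-- stated objective: simpler
-- what changed: Replaces the sorted-scan that appends to the last group on consecutive equal first elements with indexing by first element: collect the distinct first elements, sort them, and emit for each key the key's pairs filtered from the input, sorted.
import Mathlib
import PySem

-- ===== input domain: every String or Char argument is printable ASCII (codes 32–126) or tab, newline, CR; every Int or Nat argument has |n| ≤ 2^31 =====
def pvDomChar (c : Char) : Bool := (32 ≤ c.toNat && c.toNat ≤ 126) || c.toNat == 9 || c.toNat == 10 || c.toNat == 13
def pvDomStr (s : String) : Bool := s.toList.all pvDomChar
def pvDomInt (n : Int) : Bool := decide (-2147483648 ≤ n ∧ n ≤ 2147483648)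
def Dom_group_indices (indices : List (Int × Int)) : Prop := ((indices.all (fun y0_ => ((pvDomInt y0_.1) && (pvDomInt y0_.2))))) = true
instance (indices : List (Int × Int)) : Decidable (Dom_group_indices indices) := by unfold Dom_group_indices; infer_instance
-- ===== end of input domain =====

-- B groups by indexing on the first element (distinct keys sorted, then per-key filter+sort) instead
-- of A's sorted scan that appends to the last group; objective: simpler.

-- ===== PORT A =====
-- the loop body of A: append a new singleton group, or extend the last group in place
def pvStepA (gs : List (List (Int × Int))) (p : Int × Int) : List (List (Int × Int)) :=
  if gs.length == 0 || (((gs.getLastD []).headD (0, 0)).1 != p.1)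
  then gs ++ [[p]]
  else gs.dropLast ++ [(gs.getLastD []) ++ [p]]

def group_indices (indices : List (Int × Int)) : List (List (Int × Int)) :=
  (PySem.List.sorted2 indices Prod.fst Prod.snd).foldl pvStepA []

-- ===== PORT B =====
def group_indices_alt (indices : List (Int × Int)) : List (List (Int × Int)) :=
  (PySem.List.sorted (PySem.Set.ofList (indices.map Prod.fst)) (fun k => k)).map
    (fun k => PySem.List.sorted2 (indices.filter (fun p => p.1 == k)) Prod.fst Prod.snd)

-- ===== PRECONDITION & SPEC =====
def Spec_group_indices (indices : List (Int × Int)) (out : List (List (Int × Int))) : Prop := out = group_indices_alt indices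
instance (indices : List (Int × Int)) (out : List (List (Int × Int))) : Decidable (Spec_group_indices indices out) := by unfold Spec_group_indices; infer_instance

-- ===== CLAIM (what is proved, stated in full; the proofs are below) =====
def Claim_equal_group_indices : Prop := ∀ (indices : List (Int × Int)), Dom_group_indices indices → Spec_group_indices indices (group_indices indices)

-- ===== LEMMAS AND PROOFS =====

-- Python's tuple sort is sort by the lexicographic order: sorted2 fst snd = sorted by toLex
theorem sorted2_eq_sorted_toLex (xs : List (Int × Int)) :
    PySem.List.sorted2 xs Prod.fst Prod.snd = PySem.List.sorted xs (fun p => toLex p) := by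
  unfold PySem.List.sorted2 PySem.List.sorted
  simp only [Bool.false_eq_true, if_false]
  congr 1
  funext acc x
  congr 1
  funext a b
  have : (toLex a < toLex b) ↔ (a.1 < b.1 ∨ a.1 = b.1 ∧ a.2 < b.2) := Prod.Lex.toLex_lt_toLex
  by_cases h1 : a.1 < b.1 <;> by_cases h2 : b.1 < a.1 <;> by_cases h3 : a.2 < b.2 <;>
    simp [h1, h2, h3, this] <;> omega

theorem foldl_add_cons_of_not_mem (m : List Int) : ∀ (s : List Int) (x : Int), x ∉ m →
    List.foldl PySem.Set.add (x :: s) m = x :: List.foldl PySem.Set.add s m := by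
  induction m with
  | nil => intro s x _; rfl
  | cons y m ih =>
    intro s x hx
    simp only [List.mem_cons, not_or] at hx
    simp only [List.foldl_cons]
    have hadd : PySem.Set.add (x :: s) y = x :: PySem.Set.add s y := by
      have hc : (PySem.Set.contains (x :: s) y) = (PySem.Set.contains s y) := by
        simp [PySem.Set.contains]
        intro h; exact (hx.1 h.symm).elim
      simp only [PySem.Set.add, hc]
      split <;> simp
    rw [hadd, ih _ _ hx.2]

theorem foldl_add_filter_of_mem (m : List Int) : ∀ (acc : List Int) (x : Int), x ∈ acc →
    List.foldl PySem.Set.add acc m = List.foldl PySem.Set.add acc (m.filter (fun y => y != x)) := by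
  induction m with
  | nil => intro acc x _; rfl
  | cons y m ih =>
    intro acc x hx
    by_cases h : y = x
    · subst h
      have hct : PySem.Set.contains acc y = true := by
        simpa [PySem.Set.contains] using hx
      have : PySem.Set.add acc y = acc := by
        simp [PySem.Set.add]
        exact hx
      simp only [List.foldl_cons, List.filter_cons, this]
      simp only [bne_self_eq_false, Bool.false_eq_true, if_false]
      exact ih acc y hx
    · simp only [List.foldl_cons, List.filter_cons]
      have : (y != x) = true := by simp [h]
      simp only [this, if_true, List.foldl_cons]
      apply ih
      simp [PySem.Set.add]
      split <;> simp [hx]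

theorem dedup_cons (x : Int) (l : List Int) :
    PySem.List.dedup (x :: l) = x :: PySem.List.dedup (l.filter (fun y => y != x)) := by
  simp only [PySem.List.dedup, PySem.Set.ofList, List.foldl_cons]
  have h0 : PySem.Set.add PySem.Set.empty x = [x] := rfl
  rw [h0, foldl_add_filter_of_mem l [x] x (by simp)]
  rw [foldl_add_cons_of_not_mem _ [] x (by simp)]
  rfl

theorem ofList_sublist (l : List Int) : (PySem.Set.ofList l).Sublist l := by
  induction hn : l.length using Nat.strong_induction_on generalizing l with
  | _ n ih =>
    cases l with
    | nil => simp [PySem.Set.ofList, PySem.Set.empty]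
    | cons x t =>
      rw [← PySem.List.dedup_eq_ofList, dedup_cons, PySem.List.dedup_eq_ofList]
      apply List.Sublist.cons₂
      exact ((ih (t.filter (fun y => y != x)).length
        (by simpa [hn.symm] using Nat.lt_succ_of_le (List.length_filter_le _ t)) _ rfl).trans
        (List.filter_sublist (l := t)))

theorem toLexF_inj : Function.Injective (fun p : Int × Int => toLex p) :=
  fun _ _ h => toLex_inj.mp h

-- sorting then filtering one key's pairs = sorting the filtered pairs
theorem filter_sorted_toLex (xs : List (Int × Int)) (k : Int) :
    PySem.List.sorted (xs.filter (fun p => p.1 == k)) (fun p => toLex p)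
      = (PySem.List.sorted xs (fun p => toLex p)).filter (fun p => p.1 == k) := by
  apply PySem.List.eq_of_perm_of_pairwise_le_of_injective (fun p => toLex p) toLexF_inj
  · exact (PySem.List.sorted_perm _ _ _).trans
      ((PySem.List.sorted_perm xs _ false).filter _).symm
  · exact PySem.List.sorted_pairwise _ _
  · exact (PySem.List.sorted_pairwise xs _).filter _

theorem pairwise_fst_sorted (xs : List (Int × Int)) :
    (PySem.List.sorted xs (fun p => toLex p)).Pairwise (fun a b => a.1 ≤ b.1) := by
  refine (PySem.List.sorted_pairwise xs (fun p => toLex p)).imp ?_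
  intro a b h
  rcases Prod.Lex.toLex_le_toLex.mp h with h | ⟨h1, _⟩
  · exact le_of_lt h
  · exact le_of_eq h1

-- the sorted distinct first elements = first-occurrence dedup of the firsts of the sorted list
theorem keys_eq (xs : List (Int × Int)) :
    PySem.List.sorted (PySem.Set.ofList (xs.map Prod.fst)) (fun k => k)
      = PySem.List.dedup ((PySem.List.sorted xs (fun p => toLex p)).map Prod.fst) := by
  apply PySem.List.sorted_id_eq_of_perm_of_pairwise
  · rw [List.perm_ext_iff_of_nodup]
    · intro y
      rw [PySem.List.dedup_eq_ofList, PySem.Set.mem_ofList, PySem.Set.mem_ofList,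
        ((PySem.List.sorted_perm xs (fun p => toLex p) false).map Prod.fst).mem_iff]
    · rw [PySem.List.dedup_eq_ofList]; exact PySem.Set.nodup_ofList _
    · exact PySem.Set.nodup_ofList _
  · rw [PySem.List.dedup_eq_ofList]
    refine List.Pairwise.sublist (ofList_sublist _) ?_
    rw [List.pairwise_map]
    exact pairwise_fst_sorted xs

-- characterization of A's fold on a first-component-sorted list, with a running nonempty last group
theorem loopA : ∀ (s : List (Int × Int)), s.Pairwise (fun a b => a.1 ≤ b.1) →
    ∀ (gs : List (List (Int × Int))) (g : List (Int × Int)) (k : Int),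
      g ≠ [] → (∀ x ∈ g, x.1 = k) → (∀ x ∈ s, k ≤ x.1) →
      List.foldl pvStepA (gs ++ [g]) s
        = gs ++ (g ++ s.filter (fun p => p.1 == k))
            :: (PySem.List.dedup ((s.map Prod.fst).filter (fun y => y != k))).map
                 (fun j => s.filter (fun p => p.1 == j)) := by
  intro s
  induction s with
  | nil => intro _ gs g k _ _ _; simp [PySem.List.dedup, PySem.Set.ofList, PySem.Set.empty]
  | cons p s' ih =>
    intro hs gs g k hg hgk hks
    have hs' := hs.tail
    have hp2 : ∀ x ∈ s', p.1 ≤ x.1 := fun x hx => List.rel_of_pairwise_cons hs hx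
    cases g with
    | nil => exact absurd rfl hg
    | cons hd t =>
      have hdk : hd.1 = k := hgk hd (by simp)
      have hstep : ∀ gs' : List (List (Int × Int)),
          pvStepA (gs' ++ [hd :: t]) p
            = if k = p.1 then gs' ++ [(hd :: t) ++ [p]] else (gs' ++ [hd :: t]) ++ [[p]] := by
        intro gs'
        simp only [pvStepA, List.getLastD_concat, List.dropLast_concat, List.headD_cons, hdk]
        by_cases h : k = p.1
        · simp [h]
        · have : (k != p.1) = true := by simpa using h
          simp [this, h]
      by_cases hcase : k = p.1
      · -- p joins the current group
        rw [List.foldl_cons, hstep, if_pos hcase]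
        rw [ih hs' gs ((hd :: t) ++ [p]) k (by simp)
          (by intro x hx; rcases List.mem_append.mp hx with h | h
              · exact hgk x h
              · simp at h; subst h; exact hcase.symm)
          (fun x hx => hks x (by simp [hx]))]
        have hfilt : (p :: s').filter (fun q => q.1 == k) = p :: s'.filter (fun q => q.1 == k) := by
          simp [hcase.symm]
        have hkeys : ((p :: s').map Prod.fst).filter (fun y => y != k)
            = (s'.map Prod.fst).filter (fun y => y != k) := by
          simp [hcase]
        have htail : ((PySem.List.dedup ((s'.map Prod.fst).filter (fun y => y != k))).map
              (fun j => (p :: s').filter (fun q => q.1 == j)))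
            = (PySem.List.dedup ((s'.map Prod.fst).filter (fun y => y != k))).map
              (fun j => s'.filter (fun q => q.1 == j)) := by
          apply List.map_congr_left
          intro j hj
          have hjne : j ≠ k := by
            rw [PySem.List.dedup_eq_ofList, PySem.Set.mem_ofList, List.mem_filter] at hj
            simpa using hj.2
          have hpj : (p.1 == j) = false := by simp [← hcase, Ne.symm hjne]
          simp [hpj]
        rw [hfilt, hkeys, htail]
        simp [List.append_assoc]
      · -- p starts a new group
        have hkp : k < p.1 := lt_of_le_of_ne (hks p (by simp)) hcase
        rw [List.foldl_cons, hstep, if_neg hcase]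
        rw [ih hs' (gs ++ [hd :: t]) [p] p.1 (by simp) (by simp) hp2]
        have hbig : ∀ x ∈ s', k < x.1 := fun x hx => lt_of_lt_of_le hkp (hp2 x hx)
        have hfilt : (p :: s').filter (fun q => q.1 == k) = [] := by
          rw [List.filter_eq_nil_iff]
          intro x hx
          rcases List.mem_cons.mp hx with h | h
          · subst h; simp [Ne.symm hcase]
          · have := hbig x h; simp; omega
        have hkeys : ((p :: s').map Prod.fst).filter (fun y => y != k) = p.1 :: s'.map Prod.fst := by
          rw [List.map_cons, List.filter_cons]
          have h1 : (p.1 != k) = true := by simp; omega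
          rw [if_pos h1, List.filter_eq_self.mpr]
          intro a ha
          rcases List.mem_map.mp ha with ⟨x, hx, rfl⟩
          have := hbig x hx; simp; omega
        rw [hfilt, hkeys, dedup_cons]
        rw [List.map_cons]
        have hhead : (p :: s').filter (fun q => q.1 == p.1) = [p] ++ s'.filter (fun q => q.1 == p.1) := by
          simp
        rw [hhead]
        have htail : ((PySem.List.dedup ((s'.map Prod.fst).filter (fun y => y != p.1))).map
              (fun j => (p :: s').filter (fun q => q.1 == j)))
            = (PySem.List.dedup ((s'.map Prod.fst).filter (fun y => y != p.1))).map
              (fun j => s'.filter (fun q => q.1 == j)) := by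
          apply List.map_congr_left
          intro j hj
          have hjne : j ≠ p.1 := by
            rw [PySem.List.dedup_eq_ofList, PySem.Set.mem_ofList, List.mem_filter] at hj
            simpa using hj.2
          have : (p.1 == j) = false := by simp [Ne.symm hjne]
          simp [this]
        rw [htail]
        simp [List.append_assoc]

-- ===== VERDICT (by name: the statement is the Claim_ definition above) =====
theorem group_indices_spec : Claim_equal_group_indices := by
  intro indices _
  show group_indices indices = group_indices_alt indices
  unfold group_indices group_indices_alt
  simp only [sorted2_eq_sorted_toLex, filter_sorted_toLex, keys_eq]
  have hpair := pairwise_fst_sorted indices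
  cases hsrt : PySem.List.sorted indices (fun p => toLex p) with
  | nil => simp
  | cons p s' =>
    rw [hsrt] at hpair
    have step1 : List.foldl pvStepA [] (p :: s') = List.foldl pvStepA ([] ++ [[p]]) s' := by
      rfl
    rw [step1, loopA s' hpair.tail [] [p] p.1 (by simp) (by simp)
      (fun x hx => List.rel_of_pairwise_cons hpair hx)]
    rw [List.map_cons, dedup_cons]
    rw [List.map_cons]
    have hhead : (p :: s').filter (fun q => q.1 == p.1) = p :: s'.filter (fun q => q.1 == p.1) := by
      simp
    have htail : ((PySem.List.dedup ((s'.map Prod.fst).filter (fun y => y != p.1))).map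
          (fun j => (p :: s').filter (fun q => q.1 == j)))
        = (PySem.List.dedup ((s'.map Prod.fst).filter (fun y => y != p.1))).map
          (fun j => s'.filter (fun q => q.1 == j)) := by
      apply List.map_congr_left
      intro j hj
      have hjne : j ≠ p.1 := by
        rw [PySem.List.dedup_eq_ofList, PySem.Set.mem_ofList, List.mem_filter] at hj
        simpa using hj.2
      have : (p.1 == j) = false := by simp [Ne.symm hjne]
      simp [this]
    rw [hhead, htail]
    simp
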